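-- pv_equiv track=rewrite | github.com/MrBrantCode/unitest_baseline | mut_generate/mist_train_cf/cf_77000/solution.py | names_with_lowest_frequency
-- ===== SOURCE A (Python) =====
-- def names_with_lowest_frequency(dictionary):
--     # Find the lowest frequency
--     lowest_frequency = min(dictionary.values())
--
--     # Create a list of names with the lowest frequency
--     names = [name for name, frequency in dictionary.items() if frequency == lowest_frequency]
--
--     # Implement bubble sort for lexicographic ordering
--     for i in range(len(names)):
--         for j in range(len(names) - i - 1):
--             if names[j] > names[j + 1]:
--                 names[j], names[j + 1] = names[j + 1], names[j]
--
--     return names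
-- ===== SOURCE B (Python) =====
-- def names_with_lowest_frequency(dictionary):
--     # Group names by frequency in one pass, then min over the group keys
--     # and sort only the winning bucket.
--     groups = {}
--     for name, frequency in dictionary.items():
--         groups.setdefault(frequency, []).append(name)
--     lowest = min(groups)
--     return sorted(groups[lowest])
-- ===== Notes on version B (the rewrite author's own statement) =====
-- stated objective: faster
-- what changed: B makes one grouping pass building a frequency->names dict, takes min over the dict keys and sorts only the winning bucket with sorted(), replacing A's separate min-of-values scan, filter comprehension and hand-written O(k^2) bubble sort.
import Mathlib
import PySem

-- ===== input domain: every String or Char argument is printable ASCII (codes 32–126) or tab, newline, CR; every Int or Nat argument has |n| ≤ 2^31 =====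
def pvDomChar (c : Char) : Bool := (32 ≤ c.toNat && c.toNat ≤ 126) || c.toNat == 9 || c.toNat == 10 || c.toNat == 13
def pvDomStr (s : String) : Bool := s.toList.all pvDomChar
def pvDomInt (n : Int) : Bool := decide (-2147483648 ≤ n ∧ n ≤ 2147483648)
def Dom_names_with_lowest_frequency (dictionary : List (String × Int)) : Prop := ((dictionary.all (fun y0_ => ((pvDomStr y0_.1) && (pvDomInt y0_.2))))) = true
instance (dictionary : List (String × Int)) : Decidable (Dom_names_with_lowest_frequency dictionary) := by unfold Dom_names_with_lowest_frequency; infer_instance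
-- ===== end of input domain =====

-- B groups names by frequency in one dict pass, takes the min key and sorts
-- only the winning bucket, replacing A's min-of-values scan + filter + bubble sort.

-- ===== PORT A =====
-- one step of A's bubble sort: compare names[j] with names[j+1] and swap if out of order
def pvBubbleSwap (names : List String) (j : Nat) : List String :=
  match names[j]?, names[j+1]? with
  | some a, some b => if b < a then (names.set j b).set (j+1) a else names
  | _, _ => names

-- A's nested 'for i … for j …' bubble-sort loops over the names list
def pvBubbleSortLoop (names : List String) : List String :=
  (List.range names.length).foldl
    (fun ns i => (List.range (names.length - i - 1)).foldl pvBubbleSwap ns) names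

def names_with_lowest_frequency (dictionary : List (String × Int)) : List String :=
  match PySem.List.min? (dictionary.map Prod.snd) (fun v => v) with
  | none => []  -- min() raises ValueError on an empty dict; excluded by Pre_
  | some lowest_frequency =>
    pvBubbleSortLoop ((dictionary.filter (fun p => p.2 == lowest_frequency)).map Prod.fst)

-- ===== PORT B =====
-- B's grouping loop: groups.setdefault(frequency, []).append(name) over dictionary.items()
def pvGroups (dictionary : List (String × Int)) : PySem.Dict Int (List String) :=
  dictionary.foldl (fun g p => g.modify p.2 [] (fun l => l ++ [p.1])) PySem.Dict.empty

def names_with_lowest_frequency_alt (dictionary : List (String × Int)) : List String :=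
  match PySem.List.min? (pvGroups dictionary).keys (fun k => k) with
  | none => []  -- min() raises ValueError on an empty dict; excluded by Pre_
  | some lowest => PySem.List.sorted ((pvGroups dictionary).getD lowest []) (fun s => s) false

-- ===== PRECONDITION & SPEC =====
-- A (and B) raise ValueError via min() on the empty dict; nothing else raises.
def Pre_names_with_lowest_frequency (dictionary : List (String × Int)) : Prop := dictionary ≠ []
instance (dictionary : List (String × Int)) : Decidable (Pre_names_with_lowest_frequency dictionary) := by unfold Pre_names_with_lowest_frequency; infer_instance
def pvWitness_names_with_lowest_frequency : (List (String × Int)) := [("b", 2), ("a", 1), ("c", 1)]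

def Spec_names_with_lowest_frequency (dictionary : List (String × Int)) (out : List String) : Prop := out = names_with_lowest_frequency_alt dictionary
instance (dictionary : List (String × Int)) (out : List String) : Decidable (Spec_names_with_lowest_frequency dictionary out) := by unfold Spec_names_with_lowest_frequency; infer_instance

-- ===== CLAIM (what is proved, stated in full; the proofs are below) =====
def Claim_equal_names_with_lowest_frequency : Prop := ∀ (dictionary : List (String × Int)), Dom_names_with_lowest_frequency dictionary → Pre_names_with_lowest_frequency dictionary → Spec_names_with_lowest_frequency dictionary (names_with_lowest_frequency dictionary)

-- ===== LEMMAS AND PROOFS =====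

-- a full left-to-right adjacent-swap pass, as structural recursion
def pvPass1 : List String → List String
  | [] => []
  | [a] => [a]
  | a :: b :: t => if b < a then b :: pvPass1 (a :: t) else a :: pvPass1 (b :: t)

lemma pvBubbleSwap_small (ns : List String) (j : Nat) (h : ns.length ≤ 1) :
    pvBubbleSwap ns j = ns := by
  unfold pvBubbleSwap
  rw [List.getElem?_eq_none (by omega : ns.length ≤ j+1)]
  cases ns[j]? <;> rfl

lemma foldl_pvBubbleSwap_small (l : List Nat) (g : Nat → Nat) (ns : List String) (h : ns.length ≤ 1) :
    l.foldl (fun ns j => pvBubbleSwap ns (g j)) ns = ns := by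
  induction l with
  | nil => rfl
  | cons x t ih => simp only [List.foldl_cons, pvBubbleSwap_small _ _ h]; exact ih

lemma pvBubbleSwap_cons_succ (x : String) (ns : List String) (j : Nat) :
    pvBubbleSwap (x :: ns) (j+1) = x :: pvBubbleSwap ns j := by
  unfold pvBubbleSwap
  cases ha : ns[j]? <;> cases hb : ns[j+1]? <;>
    simp [ha, hb] <;> split_ifs <;> simp [List.set_cons_succ]

lemma foldl_shift (l : List Nat) (x : String) (ns : List String) :
    l.foldl (fun ns j => pvBubbleSwap ns (j+1)) (x :: ns) = x :: l.foldl pvBubbleSwap ns := by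
  induction l generalizing ns with
  | nil => rfl
  | cons j t ih => simp only [List.foldl_cons, pvBubbleSwap_cons_succ]; exact ih _

lemma pvBubbleSwap_cons2 (a b : String) (t : List String) :
    pvBubbleSwap (a :: b :: t) 0 = if b < a then b :: a :: t else a :: b :: t := by
  unfold pvBubbleSwap
  simp only [List.getElem?_cons_zero, List.getElem?_cons_succ]
  split_ifs <;> rfl

-- the inner loop 'for j in range(m)' is a pass over the first m+1 elements
lemma foldl_range_eq_pass1 (m : Nat) (ns : List String) :
    (List.range m).foldl pvBubbleSwap ns = pvPass1 (ns.take (m+1)) ++ ns.drop (m+1) := by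
  induction m generalizing ns with
  | zero =>
    rcases ns with _ | ⟨x, t⟩ <;> simp [pvPass1]
  | succ m ih =>
    rw [List.range_succ_eq_map]
    simp only [List.foldl_cons, List.foldl_map, Nat.succ_eq_add_one]
    rcases ns with _ | ⟨a, ns⟩
    · rw [pvBubbleSwap_small _ _ (by simp), foldl_pvBubbleSwap_small _ _ _ (by simp)]
      simp [pvPass1]
    rcases ns with _ | ⟨b, t⟩
    · rw [pvBubbleSwap_small _ _ (by simp), foldl_pvBubbleSwap_small _ _ _ (by simp)]
      simp [pvPass1]
    rw [pvBubbleSwap_cons2]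
    by_cases hba : b < a
    · rw [if_pos hba, foldl_shift, ih]
      simp [pvPass1, hba]
    · rw [if_neg hba, foldl_shift, ih]
      simp [pvPass1, hba]

lemma pvPass1_perm (l : List String) : (pvPass1 l).Perm l := by
  induction l using pvPass1.induct with
  | case1 => simp [pvPass1]
  | case2 a => simp [pvPass1]
  | case3 a b t hba ih =>
    rw [pvPass1, if_pos hba]
    exact (ih.cons b).trans (List.Perm.swap a b t)
  | case4 a b t hba ih =>
    rw [pvPass1, if_neg hba]
    exact ih.cons a

lemma pvPass1_last_aux : ∀ (n : Nat) (l : List String), l.length ≤ n → l ≠ [] →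
    ∃ q m, pvPass1 l = q ++ [m] ∧ ∀ x ∈ l, x ≤ m := by
  intro n
  induction n with
  | zero =>
    intro l hl hne
    rcases l with _ | ⟨a, t⟩
    · exact absurd rfl hne
    · simp at hl
  | succ n ih =>
    intro l hl hne
    rcases l with _ | ⟨a, rest⟩
    · exact absurd rfl hne
    rcases rest with _ | ⟨b, t⟩
    · exact ⟨[], a, by simp [pvPass1], by simp⟩
    by_cases hba : b < a
    · obtain ⟨q, m, heq, hle⟩ := ih (a :: t) (by simp at hl ⊢; omega) (by simp)
      refine ⟨b :: q, m, by simp [pvPass1, hba, heq], ?_⟩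
      intro x hx
      have hx' : x = a ∨ x = b ∨ x ∈ t := by simpa using hx
      rcases hx' with rfl | rfl | hx'
      · exact hle x (by simp)
      · exact le_of_lt (lt_of_lt_of_le hba (hle a (by simp)))
      · exact hle x (by simp [hx'])
    · obtain ⟨q, m, heq, hle⟩ := ih (b :: t) (by simp at hl ⊢; omega) (by simp)
      refine ⟨a :: q, m, by simp [pvPass1, hba, heq], ?_⟩
      intro x hx
      have hx' : x = a ∨ x = b ∨ x ∈ t := by simpa using hx
      rcases hx' with rfl | rfl | hx'
      · exact le_trans (not_lt.mp hba) (hle b (by simp))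
      · exact hle x (by simp)
      · exact hle x (by simp [hx'])

lemma pvPass1_last (l : List String) (hl : l ≠ []) :
    ∃ q m, pvPass1 l = q ++ [m] ∧ ∀ x ∈ l, x ≤ m :=
  pvPass1_last_aux l.length l le_rfl hl


-- outer-loop invariant: the suffix s is sorted and dominates the prefix p
lemma bubble_main (k : Nat) (n : Nat) : ∀ (p s : List String), p.length = k → n = k + s.length →
    List.Pairwise (· ≤ ·) s → (∀ x ∈ p, ∀ y ∈ s, x ≤ y) →
    ((List.range' (n - k) k 1).foldl
        (fun ns i => (List.range (n - i - 1)).foldl pvBubbleSwap ns) (p ++ s)).Perm (p ++ s) ∧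
    List.Pairwise (· ≤ ·)
      ((List.range' (n - k) k 1).foldl
        (fun ns i => (List.range (n - i - 1)).foldl pvBubbleSwap ns) (p ++ s)) := by
  induction k with
  | zero =>
    intro p s hp hn hs hps
    rw [List.length_eq_zero_iff] at hp
    subst hp
    refine ⟨by simp, ?_⟩
    simpa using hs
  | succ k ih =>
    intro p s hp hn hs hps
    have hnk : n - (k+1) + 1 = n - k := by omega
    rw [List.range'_succ, hnk]
    simp only [List.foldl_cons]
    have hm : n - (n - (k+1)) - 1 = k := by omega
    rw [hm, foldl_range_eq_pass1, ← hp, List.take_left, List.drop_left]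
    have hpne : p ≠ [] := by intro h; rw [h] at hp; simp at hp
    obtain ⟨q, m, heq, hle⟩ := pvPass1_last p hpne
    have hqsub : ∀ x ∈ q, x ∈ p := by
      intro x hx
      exact (pvPass1_perm p).subset (by rw [heq]; simp [hx])
    have hmp : m ∈ p := (pvPass1_perm p).subset (by rw [heq]; simp)
    have hq : q.length = k := by
      have hlen := (pvPass1_perm p).length_eq
      rw [heq] at hlen
      simp [hp] at hlen
      omega
    rw [heq, List.append_assoc, List.singleton_append]
    obtain ⟨hperm, hpair⟩ := ih q (m :: s) hq (by simp; omega)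
      (List.pairwise_cons.mpr ⟨fun y hy => hps m hmp y hy, hs⟩)
      (by
        intro x hx y hy
        rcases List.mem_cons.mp hy with rfl | hy
        · exact hle x (hqsub x hx)
        · exact hps x (hqsub x hx) y hy)
    have hstep : (q ++ m :: s).Perm (p ++ s) := by
      have h2 : q ++ m :: s = pvPass1 p ++ s := by rw [heq]; simp
      rw [h2]
      exact (pvPass1_perm p).append_right s
    exact ⟨hperm.trans hstep, hpair⟩

-- A's bubble sort IS sorted(names)
lemma bubble_eq_sorted (names : List String) :
    pvBubbleSortLoop names = PySem.List.sorted names (fun s => s) false := by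
  unfold pvBubbleSortLoop
  obtain ⟨hperm, hpair⟩ := bubble_main names.length names.length names [] rfl (by simp)
    List.Pairwise.nil (by simp)
  rw [List.range_eq_range']
  symm
  apply PySem.List.sorted_id_eq_of_perm_of_pairwise
  · simpa using hperm
  · simpa using hpair

-- B's grouping dict: the bucket of frequency c is the filtered name list, in order
lemma groups_getD (dictionary : List (String × Int)) (c : Int) :
    (pvGroups dictionary).getD c []
      = (dictionary.filter (fun p => p.2 == c)).map Prod.fst := by
  unfold pvGroups
  have h : dictionary.foldl (fun g p => g.modify p.2 [] (fun l => l ++ [p.1])) PySem.Dict.empty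
      = (dictionary.map (fun p => (p.2, p.1))).foldl
          (fun g q => g.modify q.1 [] (fun l => l ++ [q.2])) PySem.Dict.empty := by
    rw [List.foldl_map]
  rw [h, PySem.Dict.getD_foldl_modify_append]
  simp [List.filter_map, Function.comp_def]

lemma groups_keys_mem (dictionary : List (String × Int)) (c : Int) :
    c ∈ (pvGroups dictionary).keys ↔ c ∈ dictionary.map Prod.snd := by
  unfold pvGroups
  rw [PySem.Dict.keys_foldl_modify_key]
  simp [PySem.Dict.keys_empty, PySem.Set.mem_update]

lemma min_congr_mem (xs ys : List Int) (h : ∀ x, x ∈ xs ↔ x ∈ ys) :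
    PySem.List.min? xs (fun v => v) = PySem.List.min? ys (fun v => v) := by
  rcases hx : PySem.List.min? xs (fun v => v) with _ | a <;>
    rcases hy : PySem.List.min? ys (fun v => v) with _ | b
  · rfl
  · rw [PySem.List.min?_eq_none_iff] at hx
    have hmem := PySem.List.min?_mem hy
    rw [← h] at hmem
    simp [hx] at hmem
  · rw [PySem.List.min?_eq_none_iff] at hy
    have hmem := PySem.List.min?_mem hx
    rw [h] at hmem
    simp [hy] at hmem
  · have ha : a ∈ ys := (h a).mp (PySem.List.min?_mem hx)
    have hb : b ∈ xs := (h b).mpr (PySem.List.min?_mem hy)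
    have h1 := PySem.List.min?_isMin hx b hb
    have h2 := PySem.List.min?_isMin hy a ha
    simp only [Option.some.injEq]
    exact le_antisymm h1 h2

-- ===== VERDICT (by name: the statement is the Claim_ definition above) =====
theorem names_with_lowest_frequency_spec : Claim_equal_names_with_lowest_frequency := by
  intro dictionary _ hpre
  unfold Spec_names_with_lowest_frequency names_with_lowest_frequency names_with_lowest_frequency_alt
  have hmins : PySem.List.min? (pvGroups dictionary).keys (fun k => k)
      = PySem.List.min? (dictionary.map Prod.snd) (fun v => v) :=
    min_congr_mem _ _ (groups_keys_mem dictionary)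
  rw [hmins]
  cases hlo : PySem.List.min? (dictionary.map Prod.snd) (fun v => v) with
  | none => rfl
  | some lo => simp only [bubble_eq_sorted, groups_getD]
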